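-- pv_equiv track=rewrite | github.com/shawinsoranakom/CodeSnippets | CollectedSnippets/ComplexMethod/cm045811.py | _trim_rich_text_segments
-- ===== SOURCE A (Python) =====
-- def _trim_rich_text_segments(segments: list[dict]) -> list[dict]:
--         trimmed_segments = [dict(segment) for segment in segments if segment.get("text") is not None]
--         if not trimmed_segments:
--             return []
--
--         start_idx = 0
--         while start_idx < len(trimmed_segments):
--             normalized_text = trimmed_segments[start_idx]["text"].lstrip()
--             if normalized_text:
--                 trimmed_segments[start_idx]["text"] = normalized_text
--                 break
--             start_idx += 1
--
--         if start_idx == len(trimmed_segments):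
--             return []
--
--         trimmed_segments = trimmed_segments[start_idx:]
--         end_idx = len(trimmed_segments) - 1
--         while end_idx >= 0:
--             normalized_text = trimmed_segments[end_idx]["text"].rstrip()
--             if normalized_text:
--                 trimmed_segments[end_idx]["text"] = normalized_text
--                 break
--             end_idx -= 1
--
--         if end_idx < 0:
--             return []
--
--         return trimmed_segments[:end_idx + 1]
-- ===== SOURCE B (Python) =====
-- def _trim_rich_text_segments(segments):
--     kept = [dict(s) for s in segments if s.get("text") is not None]
--     # drop whitespace-only segments from both ends, then normalize the endpoints
--     while kept and not kept[0]["text"].strip():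
--         kept.pop(0)
--     while kept and not kept[-1]["text"].strip():
--         kept.pop()
--     if kept:
--         kept[0]["text"] = kept[0]["text"].lstrip()
--         kept[-1]["text"] = kept[-1]["text"].rstrip()
--     return kept
-- ===== Notes on version B (the rewrite author's own statement) =====
-- stated objective: simpler
-- what changed: B drops whitespace-only segments from both ends of the filtered list first and then normalizes just the two endpoint texts, instead of A's two interleaved find-then-mutate-then-slice passes with early returns.
import Mathlib
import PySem

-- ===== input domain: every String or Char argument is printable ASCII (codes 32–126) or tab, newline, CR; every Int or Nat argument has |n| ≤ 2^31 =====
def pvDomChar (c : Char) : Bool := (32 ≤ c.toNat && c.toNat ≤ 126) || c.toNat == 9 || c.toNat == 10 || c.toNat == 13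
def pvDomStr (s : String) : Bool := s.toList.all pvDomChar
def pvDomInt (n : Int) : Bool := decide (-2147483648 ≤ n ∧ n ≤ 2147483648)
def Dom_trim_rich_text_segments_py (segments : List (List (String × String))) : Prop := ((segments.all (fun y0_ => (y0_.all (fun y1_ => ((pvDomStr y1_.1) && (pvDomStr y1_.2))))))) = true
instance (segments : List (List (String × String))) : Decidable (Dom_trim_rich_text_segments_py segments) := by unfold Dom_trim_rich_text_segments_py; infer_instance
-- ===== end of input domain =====

-- B drops whitespace-only segments from both ends first and normalizes the two endpoint texts afterwards,
-- instead of A's interleaved find-mutate-then-slice passes; objective: simpler. (Neither program mutates its argument's dicts.)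


-- shared dict helpers (a dict here is an association list with String values, so
-- `segment.get("text") is not None` is exactly `the key "text" is present`)
-- segment["text"]; the "" default is never reached: both programs read texts only of segments that passed the filter
def pvText (d : List (String × String)) : String := (List.lookup "text" d).getD ""
def pvHasText (d : List (String × String)) : Bool := (List.lookup "text" d).isSome
-- segment["text"] = v : overwrite in place (the key is present after the filter; appends if absent, like dict assignment)
def pvSetText : List (String × String) → String → List (String × String)
  | [], v => [("text", v)]
  | (k, w) :: r, v => if k == "text" then ("text", v) :: r else (k, w) :: pvSetText r v

-- ===== PORT A =====
-- the first while loop + `trimmed_segments = trimmed_segments[start_idx:]`: scan forward,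
-- at the first segment whose lstripped text is truthy overwrite its text and keep the rest
def pvAStart : List (List (String × String)) → Option (List (List (String × String)))
  | [] => none    -- start_idx == len(trimmed_segments) : return []
  | d :: rest =>
    let n := PySem.Str.lstrip (pvText d)
    if n ≠ "" then some (pvSetText d n :: rest) else pvAStart rest

-- the second while loop + `trimmed_segments[:end_idx + 1]`: scanning from the end,
-- at the last segment whose rstripped text is truthy overwrite its text and drop what follows
def pvAEnd : List (List (String × String)) → Option (List (List (String × String)))
  | [] => none    -- end_idx < 0 : return []
  | d :: rest =>
    match pvAEnd rest with
    | some r => some (d :: r)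
    | none =>
      let n := PySem.Str.rstrip (pvText d)
      if n ≠ "" then some [pvSetText d n] else none

def trim_rich_text_segments_py (segments : List (List (String × String))) : List (List (String × String)) :=
  let trimmed := segments.filter pvHasText
  match pvAStart trimmed with
  | none => []
  | some m => (pvAEnd m).getD []

-- ===== PORT B =====
def pvBlank (d : List (String × String)) : Bool := PySem.Str.strip (pvText d) == ""

-- kept[0]["text"] = kept[0]["text"].lstrip()   (no-op on []: B's `if kept:` guard)
def pvUpdFirst : List (List (String × String)) → List (List (String × String))
  | [] => []
  | d :: r => pvSetText d (PySem.Str.lstrip (pvText d)) :: r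

-- kept[-1]["text"] = kept[-1]["text"].rstrip()   (no-op on [])
def pvUpdLast : List (List (String × String)) → List (List (String × String))
  | [] => []
  | [d] => [pvSetText d (PySem.Str.rstrip (pvText d))]
  | d :: r => d :: pvUpdLast r

def trim_rich_text_segments_py_alt (segments : List (List (String × String))) : List (List (String × String)) :=
  let kept := segments.filter pvHasText
  let kept := kept.dropWhile pvBlank                        -- while kept and front blank: kept.pop(0)
  let kept := (kept.reverse.dropWhile pvBlank).reverse      -- while kept and back blank: kept.pop()
  pvUpdLast (pvUpdFirst kept)

-- ===== PRECONDITION & SPEC =====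
def Spec_trim_rich_text_segments_py (segments : List (List (String × String))) (out : List (List (String × String))) : Prop := out = trim_rich_text_segments_py_alt segments
instance (segments : List (List (String × String))) (out : List (List (String × String))) : Decidable (Spec_trim_rich_text_segments_py segments out) := by unfold Spec_trim_rich_text_segments_py; infer_instance

-- ===== CLAIM (what is proved, stated in full; the proofs are below) =====
def Claim_equal_trim_rich_text_segments_py : Prop := ∀ (segments : List (List (String × String))), Dom_trim_rich_text_segments_py segments → Spec_trim_rich_text_segments_py segments (trim_rich_text_segments_py segments)

-- ===== LEMMAS AND PROOFS =====

-- proof-only abbreviations for the two endpoint updates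
def pvUpdL (d : List (String × String)) : List (String × String) := pvSetText d (PySem.Str.lstrip (pvText d))
def pvUpdR (d : List (String × String)) : List (String × String) := pvSetText d (PySem.Str.rstrip (pvText d))

theorem pvText_setText (d : List (String × String)) (v : String) : pvText (pvSetText d v) = v := by
  induction d with
  | nil => rfl
  | cons p r ih =>
    obtain ⟨k, w⟩ := p
    by_cases h : k = "text"
    · subst h
      simp [pvSetText, pvText]
    · have hk : ("text" == k) = false := beq_eq_false_iff_ne.mpr (Ne.symm h)
      have hk' : (k == "text") = false := beq_eq_false_iff_ne.mpr h
      simp only [pvSetText, hk', Bool.false_eq_true, if_false, pvText, List.lookup, hk] at ih ⊢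
      exact ih

theorem pv_forall_dropWhile {α : Type} (p : α → Bool) (l : List α) :
    (∀ c ∈ l.dropWhile p, p c = true) ↔ (∀ c ∈ l, p c = true) := by
  constructor
  · intro h c hc
    by_cases hs : p c = true
    · exact hs
    · refine h c ?_
      have hsplit := List.takeWhile_append_dropWhile (p := p) (l := l)
      rw [← hsplit] at hc
      rcases List.mem_append.mp hc with h1 | h2
      · exact absurd (List.mem_takeWhile_imp h1) hs
      · exact h2
  · intro h c hc
    exact h c (List.dropWhile_subset _ hc)

-- "all characters are whitespace" characterizations of empty strip results (lstrip/rstrip/strip are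
-- definitionally dropWhile isspace / its reverse form / their composition)
theorem pv_lstrip_nil_iff (cs : List Char) :
    PySem.Chars.lstrip cs = [] ↔ ∀ c ∈ cs, PySem.Chars.isspace c = true := by
  show cs.dropWhile PySem.Chars.isspace = [] ↔ _
  exact List.dropWhile_eq_nil_iff

theorem pv_rstrip_nil_iff (cs : List Char) :
    PySem.Chars.rstrip cs = [] ↔ ∀ c ∈ cs, PySem.Chars.isspace c = true := by
  show (cs.reverse.dropWhile PySem.Chars.isspace).reverse = [] ↔ _
  rw [List.reverse_eq_nil_iff, List.dropWhile_eq_nil_iff]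
  constructor
  · intro h c hc; exact h c (List.mem_reverse.mpr hc)
  · intro h c hc; exact h c (List.mem_reverse.mp hc)

theorem pv_strip_nil_iff (cs : List Char) :
    PySem.Chars.strip cs = [] ↔ ∀ c ∈ cs, PySem.Chars.isspace c = true := by
  show PySem.Chars.rstrip (PySem.Chars.lstrip cs) = [] ↔ _
  rw [pv_rstrip_nil_iff]
  show (∀ c ∈ cs.dropWhile PySem.Chars.isspace, _) ↔ _
  exact pv_forall_dropWhile _ cs

theorem pv_lstrip_empty_iff (t : String) : PySem.Str.lstrip t = "" ↔ PySem.Str.strip t = "" := by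
  rw [← String.toList_eq_nil_iff, ← String.toList_eq_nil_iff, PySem.Str.toList_lstrip,
      PySem.Str.toList_strip, pv_lstrip_nil_iff, pv_strip_nil_iff]

theorem pv_rstrip_empty_iff (t : String) : PySem.Str.rstrip t = "" ↔ PySem.Str.strip t = "" := by
  rw [← String.toList_eq_nil_iff, ← String.toList_eq_nil_iff, PySem.Str.toList_rstrip,
      PySem.Str.toList_strip, pv_rstrip_nil_iff, pv_strip_nil_iff]

theorem pv_strip_lstrip_empty_iff (t : String) :
    PySem.Str.strip (PySem.Str.lstrip t) = "" ↔ PySem.Str.strip t = "" := by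
  rw [← String.toList_eq_nil_iff, ← String.toList_eq_nil_iff, PySem.Str.toList_strip,
      PySem.Str.toList_strip, PySem.Str.toList_lstrip, pv_strip_nil_iff, pv_strip_nil_iff]
  show (∀ c ∈ t.toList.dropWhile PySem.Chars.isspace, _) ↔ _
  exact pv_forall_dropWhile _ t.toList

theorem pvBlank_updL (d : List (String × String)) : pvBlank (pvUpdL d) = pvBlank d := by
  unfold pvBlank pvUpdL
  rw [pvText_setText, Bool.eq_iff_iff]
  simp only [beq_iff_eq]
  exact pv_strip_lstrip_empty_iff _

-- characterization of A's forward scan: drop the blank prefix, lstrip the first kept text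
theorem pvAStart_eq (l : List (List (String × String))) :
    pvAStart l = match l.dropWhile pvBlank with
      | [] => none
      | d :: r => some (pvUpdL d :: r) := by
  induction l with
  | nil => rfl
  | cons d rest ih =>
    by_cases hb : pvBlank d = true
    · have hl : PySem.Str.lstrip (pvText d) = "" := by
        rw [pv_lstrip_empty_iff]
        simpa [pvBlank] using hb
      simp [pvAStart, hl, hb, ih]
    · have hs : PySem.Str.strip (pvText d) ≠ "" := by
        simpa [pvBlank] using hb
      have hl : PySem.Str.lstrip (pvText d) ≠ "" := fun h => hs ((pv_lstrip_empty_iff _).mp h)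
      simp [pvAStart, hl, hb, pvUpdL]

-- characterization of A's backward scan: drop the blank suffix, rstrip the last kept text
theorem pvAEnd_eq (l : List (List (String × String))) :
    pvAEnd l = match l.reverse.dropWhile pvBlank with
      | [] => none
      | e :: r => some ((pvUpdR e :: r).reverse) := by
  induction l with
  | nil => rfl
  | cons d rest ih =>
    rw [List.reverse_cons, List.dropWhile_append]
    cases h2 : rest.reverse.dropWhile pvBlank with
    | nil =>
      have hend : pvAEnd rest = none := by rw [ih, h2]
      by_cases hb : pvBlank d = true
      · have hr : PySem.Str.rstrip (pvText d) = "" := by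
          rw [pv_rstrip_empty_iff]; simpa [pvBlank] using hb
        simp [pvAEnd, hend, hr, hb]
      · have hs : PySem.Str.strip (pvText d) ≠ "" := by simpa [pvBlank] using hb
        have hr : PySem.Str.rstrip (pvText d) ≠ "" := fun h => hs ((pv_rstrip_empty_iff _).mp h)
        simp [pvAEnd, hend, hr, hb, pvUpdR]
    | cons e r =>
      have hend : pvAEnd rest = some ((pvUpdR e :: r).reverse) := by rw [ih, h2]
      simp [pvAEnd, hend]

theorem pvUpdLast_append (xs : List (List (String × String))) (e : List (String × String)) :
    pvUpdLast (xs ++ [e]) = xs ++ [pvUpdR e] := by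
  induction xs with
  | nil => rfl
  | cons x xs ih =>
    cases xs with
    | nil => simp [pvUpdLast, pvUpdR]
    | cons y ys => simpa [pvUpdLast] using ih

-- the two cores agree on any filtered list l
theorem pv_core (l : List (List (String × String))) :
    (match pvAStart l with
      | none => []
      | some m => (pvAEnd m).getD []) =
    pvUpdLast (pvUpdFirst (((l.dropWhile pvBlank).reverse.dropWhile pvBlank).reverse)) := by
  rw [pvAStart_eq]
  cases hdw : l.dropWhile pvBlank with
  | nil => simp [pvUpdFirst, pvUpdLast]
  | cons d rest =>
    have hne : l.dropWhile pvBlank ≠ [] := by rw [hdw]; simp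
    have h1 := List.head_dropWhile_not pvBlank hne
    have h3 : (l.dropWhile pvBlank).head? = some d := by rw [hdw]; rfl
    rw [List.head?_eq_some_head hne] at h3
    have hd : pvBlank d = false := by
      rw [Option.some.injEq] at h3
      rwa [h3] at h1
    show (pvAEnd (pvUpdL d :: rest)).getD [] =
      pvUpdLast (pvUpdFirst (List.dropWhile pvBlank (d :: rest).reverse).reverse)
    rw [pvAEnd_eq, List.reverse_cons, List.dropWhile_append, List.reverse_cons,
        List.dropWhile_append]
    cases h2 : rest.reverse.dropWhile pvBlank with
    | nil =>
      have hb : pvBlank (pvSetText d (PySem.Str.lstrip (pvText d))) = false := by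
        have h4 := pvBlank_updL d
        unfold pvUpdL at h4
        rw [h4]; exact hd
      simp [hb, hd, pvUpdFirst, pvUpdLast, pvUpdL, pvUpdR, pvText_setText]
    | cons e r =>
      have hupd : pvUpdLast ((pvUpdL d :: r.reverse) ++ [e]) = (pvUpdL d :: r.reverse) ++ [pvUpdR e] :=
        pvUpdLast_append _ e
      simp only [List.isEmpty_cons, Bool.false_eq_true, if_false, List.cons_append,
        List.reverse_cons, List.reverse_append] at hupd ⊢
      simp [pvUpdFirst, pvUpdL, pvUpdR] at hupd ⊢
      exact hupd.symm

-- ===== VERDICT (by name: the statement is the Claim_ definition above) =====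
theorem trim_rich_text_segments_py_spec : Claim_equal_trim_rich_text_segments_py := by
  intro segments _
  exact pv_core (segments.filter pvHasText)
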